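-- pv_equiv track=rewrite | github.com/fabhiansan/thesis | utils/pointer_to_penman.py | _extract_concept_and_relations
-- ===== SOURCE A (Python) =====
-- from typing import Dict, List, Tuple
--
-- def _extract_concept_and_relations(amr_str: str) -> Tuple[str, List[Tuple[str, str]]]:
--     """Extract concept and relations from an AMR substring."""
--     parts = amr_str.strip().split()
--     pointer = parts[0]
--     concept = parts[1]
--     relations = []
--     i = 2
--     while i < len(parts):
--         if parts[i].startswith(':'):
--             rel = parts[i]
--             i += 1
--             if i < len(parts):
--                 val = parts[i]
--                 if val.startswith('('):
--                     # Find matching closing parenthesis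
--                     pcount = 1
--                     j = i + 1
--                     while j < len(parts) and pcount > 0:
--                         if parts[j] == '(':
--                             pcount += 1
--                         elif parts[j] == ')':
--                             pcount -= 1
--                         j += 1
--                     val = ' '.join(parts[i:j])
--                     i = j
--                 else:
--                     i += 1
--                 relations.append((rel, val))
--         else:
--             i += 1
--     return concept, relations
-- ===== SOURCE B (Python) =====
-- def _extract_concept_and_relations(amr_str):
--     """Extract concept and relations from an AMR substring (single flat pass with a depth counter)."""
--     parts = amr_str.strip().split()
--     concept = parts[1]
--     relations = []
--     rel = None      # pending relation label waiting for its value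
--     buf = None      # None = not inside a parenthesised group; else buffered tokens
--     depth = 0
--     for tok in parts[2:]:
--         if buf is not None:
--             if tok == '(':
--                 depth += 1
--             elif tok == ')':
--                 depth -= 1
--             buf.append(tok)
--             if depth == 0:
--                 relations.append((rel, ' '.join(buf)))
--                 rel, buf = None, None
--         elif rel is not None:
--             if tok.startswith('('):
--                 buf, depth = [tok], 1
--             else:
--                 relations.append((rel, tok))
--                 rel = None
--         elif tok.startswith(':'):
--             rel = tok
--     if buf is not None:
--         relations.append((rel, ' '.join(buf)))
--     return concept, relations
-- ===== Notes on version B (the rewrite author's own statement) =====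
-- stated objective: alternative
-- what changed: Replaced A's index-based outer while loop with its nested inner matching-parenthesis scan and slice re-join by a single flat left-to-right pass over the tokens that maintains a depth counter, a pending relation label and a token buffer, emitting each (rel, value) pair as soon as its group closes.
import Mathlib
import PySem

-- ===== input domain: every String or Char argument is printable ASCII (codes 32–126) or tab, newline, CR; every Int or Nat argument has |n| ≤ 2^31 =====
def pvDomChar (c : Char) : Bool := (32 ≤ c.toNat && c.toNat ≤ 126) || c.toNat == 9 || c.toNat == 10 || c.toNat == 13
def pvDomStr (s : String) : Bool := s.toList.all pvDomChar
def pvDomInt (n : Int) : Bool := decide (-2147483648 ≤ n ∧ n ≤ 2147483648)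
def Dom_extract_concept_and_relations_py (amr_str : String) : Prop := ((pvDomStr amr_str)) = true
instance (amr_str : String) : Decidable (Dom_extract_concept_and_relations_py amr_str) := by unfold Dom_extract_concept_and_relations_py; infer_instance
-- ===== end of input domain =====

-- B replaces A's nested inner matching-parenthesis scan + slice re-join by one flat pass with a depth counter and a token buffer (alternative decomposition, same cost); equivalence of return values is proved on inputs with at least two tokens (A raises IndexError otherwise).

-- ===== PORT A =====

-- inner while loop: 'while j < len(parts) and pcount > 0: …' returning the final j.
-- fuel = parts.length is only a totality guard: j advances by 1 each iteration, so the
-- loop runs at most parts.length - j ≤ fuel times and the guard never cuts it short.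
def aInner (parts : List String) (fuel : Nat) (pcount : Int) (j : Nat) : Nat :=
  match fuel with
  | 0 => j
  | fuel + 1 =>
    if j < parts.length ∧ 0 < pcount then
      if parts.getD j "" == "(" then aInner parts fuel (pcount + 1) (j + 1)
      else if parts.getD j "" == ")" then aInner parts fuel (pcount - 1) (j + 1)
      else aInner parts fuel pcount (j + 1)
    else j

-- outer while loop of A (fuel = parts.length is again only a totality guard: i strictly increases)
def aLoop (parts : List String) (fuel : Nat) (i : Nat) (relations : List (String × String)) :
    List (String × String) :=
  match fuel with
  | 0 => relations
  | fuel + 1 =>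
    if i < parts.length then
      if PySem.Str.startswith (parts.getD i "") ":" then
        let rel := parts.getD i ""
        if i + 1 < parts.length then
          let val := parts.getD (i + 1) ""
          if PySem.Str.startswith val "(" then
            let j := aInner parts parts.length 1 (i + 2)
            let val := PySem.Str.join " " (((parts.drop (i + 1)).take (j - (i + 1))))
            aLoop parts fuel j (relations ++ [(rel, val)])
          else
            aLoop parts fuel (i + 2) (relations ++ [(rel, val)])
        else relations
      else aLoop parts fuel (i + 1) relations
    else relations

def extract_concept_and_relations_py (amr_str : String) : String × (List (String × String)) :=
  let parts := PySem.Str.split₀ (PySem.Str.strip amr_str)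
  let concept := parts.getD 1 ""
  (concept, aLoop parts parts.length 2 [])

-- ===== PORT B =====

inductive BState where
  | outside
  | pending (rel : String)
  | group (rel : String) (buf : List String) (depth : Int)
deriving Repr, DecidableEq

def bStep (acc : List (String × String) × BState) (tok : String) :
    List (String × String) × BState :=
  match acc with
  | (rels, .group rel buf depth) =>
      let depth' := if tok == "(" then depth + 1 else if tok == ")" then depth - 1 else depth
      let buf' := buf ++ [tok]
      if depth' == 0 then (rels ++ [(rel, PySem.Str.join " " buf')], .outside)
      else (rels, .group rel buf' depth')
  | (rels, .pending rel) =>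
      if PySem.Str.startswith tok "(" then (rels, .group rel [tok] 1)
      else (rels ++ [(rel, tok)], .outside)
  | (rels, .outside) =>
      if PySem.Str.startswith tok ":" then (rels, .pending tok) else (rels, .outside)

def bFinish : List (String × String) × BState → List (String × String)
  | (rels, .group rel buf _) => rels ++ [(rel, PySem.Str.join " " buf)]
  | (rels, _) => rels

def extract_concept_and_relations_py_alt (amr_str : String) : String × (List (String × String)) :=
  let parts := PySem.Str.split₀ (PySem.Str.strip amr_str)
  let concept := parts.getD 1 ""
  (concept, bFinish ((parts.drop 2).foldl bStep ([], .outside)))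

-- ===== PRECONDITION & SPEC =====
-- A raises IndexError (parts[0]/parts[1]) when the stripped string has fewer than two whitespace-separated tokens; those inputs are excluded.
def Pre_extract_concept_and_relations_py (amr_str : String) : Prop :=
  2 ≤ (PySem.Str.split₀ (PySem.Str.strip amr_str)).length
instance (amr_str : String) : Decidable (Pre_extract_concept_and_relations_py amr_str) := by
  unfold Pre_extract_concept_and_relations_py; infer_instance

def pvWitness_extract_concept_and_relations_py : String := "a b"

def Spec_extract_concept_and_relations_py (amr_str : String)
    (out : String × (List (String × String))) : Prop :=
  out = extract_concept_and_relations_py_alt amr_str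
instance (amr_str : String) (out : String × (List (String × String))) :
    Decidable (Spec_extract_concept_and_relations_py amr_str out) := by
  unfold Spec_extract_concept_and_relations_py; infer_instance

-- ===== CLAIM (what is proved, stated in full; the proofs are below) =====
def Claim_equal_extract_concept_and_relations_py : Prop :=
  ∀ (amr_str : String), Dom_extract_concept_and_relations_py amr_str →
    Pre_extract_concept_and_relations_py amr_str →
    Spec_extract_concept_and_relations_py amr_str (extract_concept_and_relations_py amr_str)

-- ===== LEMMAS AND PROOFS =====

theorem aInner_ge (parts : List String) : ∀ (fuel : Nat) (pcount : Int) (j : Nat),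
    j ≤ aInner parts fuel pcount j := by
  intro fuel
  induction fuel with
  | zero => intro pc j; rw [aInner]
  | succ n ih =>
    intro pc j
    rw [aInner]
    by_cases hc : j < parts.length ∧ 0 < pc
    · rw [if_pos hc]
      have h1 := ih (pc + 1) (j + 1)
      have h2 := ih (pc - 1) (j + 1)
      have h3 := ih pc (j + 1)
      split_ifs <;> omega
    · rw [if_neg hc]

theorem bStep_group_open (rels : List (String × String)) (rel : String) (buf : List String)
    (pc : Int) (tok : String) (h1 : tok = "(") (h : pc + 1 ≠ 0) :
    bStep (rels, .group rel buf pc) tok = (rels, .group rel (buf ++ [tok]) (pc + 1)) := by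
  subst h1; simp [bStep, h]

theorem bStep_group_close (rels : List (String × String)) (rel : String) (buf : List String)
    (pc : Int) (tok : String) (h1 : tok ≠ "(") (h2 : tok = ")") (h : pc - 1 ≠ 0) :
    bStep (rels, .group rel buf pc) tok = (rels, .group rel (buf ++ [tok]) (pc - 1)) := by
  subst h2; simp [bStep, h]

theorem bStep_group_emit (rels : List (String × String)) (rel : String) (buf : List String)
    (tok : String) (h1 : tok ≠ "(") (h2 : tok = ")") :
    bStep (rels, .group rel buf 1) tok =
      (rels ++ [(rel, PySem.Str.join " " (buf ++ [tok]))], .outside) := by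
  subst h2; simp [bStep]

theorem bStep_group_other (rels : List (String × String)) (rel : String) (buf : List String)
    (pc : Int) (tok : String) (h1 : tok ≠ "(") (h2 : tok ≠ ")") (h : pc ≠ 0) :
    bStep (rels, .group rel buf pc) tok = (rels, .group rel (buf ++ [tok]) pc) := by
  simp [bStep, h1, h2, h]

theorem aInner_main (parts : List String) : ∀ (n : Nat) (pcount : Int) (j : Nat),
    parts.length ≤ j + n →
    ∀ (rel : String) (buf : List String) (rels : List (String × String)), 0 < pcount →
      bFinish ((parts.drop j).foldl bStep (rels, .group rel buf pcount)) =
      bFinish ((parts.drop (aInner parts n pcount j)).foldl bStep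
        (rels ++ [(rel, PySem.Str.join " "
          (buf ++ (parts.drop j).take (aInner parts n pcount j - j)))], .outside)) := by
  intro n
  induction n with
  | zero =>
    intro pc j hn rel buf rels hpc
    rw [aInner]
    simp [List.drop_eq_nil_of_le (by omega : parts.length ≤ j), bFinish]
  | succ n ih =>
    intro pc j hn rel buf rels hpc
    by_cases hj : j < parts.length
    · have hdrop : parts.drop j = parts[j] :: parts.drop (j + 1) := List.drop_eq_getElem_cons hj
      have hgetD : parts.getD j "" = parts[j] := by
        simp [List.getD_eq_getElem?_getD, List.getElem?_eq_getElem hj]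
      rw [aInner, if_pos ⟨hj, hpc⟩, hgetD]
      by_cases h1 : parts[j] = "("
      · -- token "(" : depth increases, stay in group
        rw [if_pos (by simp [h1])]
        have hge := aInner_ge parts n (pc + 1) (j + 1)
        have htake : (parts.drop j).take (aInner parts n (pc + 1) (j + 1) - j) =
            parts[j] :: (parts.drop (j + 1)).take (aInner parts n (pc + 1) (j + 1) - (j + 1)) := by
          rw [hdrop, show aInner parts n (pc + 1) (j + 1) - j
              = (aInner parts n (pc + 1) (j + 1) - (j + 1)) + 1 by omega, List.take_succ_cons]
        rw [htake, hdrop, List.foldl_cons,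
          bStep_group_open rels rel buf pc parts[j] h1 (by omega)]
        rw [ih (pc + 1) (j + 1) (by omega) rel (buf ++ [parts[j]]) rels (by omega)]
        simp [List.append_assoc]
      · by_cases h2 : parts[j] = ")"
        · rw [if_neg (by simp [h1]), if_pos (by simp [h2])]
          by_cases h3 : pc = 1
          · -- depth hits zero: group closes here
            subst h3
            have haI : aInner parts n (1 - 1) (j + 1) = j + 1 := by
              cases n <;> norm_num [aInner]
            have htake : (parts.drop j).take (j + 1 - j) = [parts[j]] := by
              rw [hdrop, show j + 1 - j = 1 by omega]; rfl
            rw [haI, htake, hdrop, List.foldl_cons, bStep_group_emit rels rel buf parts[j] h1 h2]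
          · -- depth decreases, stays positive
            have hge := aInner_ge parts n (pc - 1) (j + 1)
            have htake : (parts.drop j).take (aInner parts n (pc - 1) (j + 1) - j) =
                parts[j] :: (parts.drop (j + 1)).take (aInner parts n (pc - 1) (j + 1) - (j + 1)) := by
              rw [hdrop, show aInner parts n (pc - 1) (j + 1) - j
                  = (aInner parts n (pc - 1) (j + 1) - (j + 1)) + 1 by omega, List.take_succ_cons]
            rw [htake, hdrop, List.foldl_cons,
              bStep_group_close rels rel buf pc parts[j] h1 h2 (by omega)]
            rw [ih (pc - 1) (j + 1) (by omega) rel (buf ++ [parts[j]]) rels (by omega)]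
            simp [List.append_assoc]
        · -- ordinary token: depth unchanged
          rw [if_neg (by simp [h1]), if_neg (by simp [h2])]
          have hge := aInner_ge parts n pc (j + 1)
          have htake : (parts.drop j).take (aInner parts n pc (j + 1) - j) =
              parts[j] :: (parts.drop (j + 1)).take (aInner parts n pc (j + 1) - (j + 1)) := by
            rw [hdrop, show aInner parts n pc (j + 1) - j
                = (aInner parts n pc (j + 1) - (j + 1)) + 1 by omega, List.take_succ_cons]
          rw [htake, hdrop, List.foldl_cons,
            bStep_group_other rels rel buf pc parts[j] h1 h2 (by omega)]
          rw [ih pc (j + 1) (by omega) rel (buf ++ [parts[j]]) rels (by omega)]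
          simp [List.append_assoc]
    · rw [aInner, if_neg (by omega)]
      simp [List.drop_eq_nil_of_le (by omega : parts.length ≤ j), bFinish]

theorem main_loop_aux (parts : List String) : ∀ (n : Nat) (i : Nat),
    parts.length ≤ i + n → ∀ (rels : List (String × String)),
    aLoop parts n i rels = bFinish ((parts.drop i).foldl bStep (rels, .outside)) := by
  intro n
  induction n with
  | zero =>
    intro i hn rels
    rw [aLoop]
    simp [List.drop_eq_nil_of_le (by omega : parts.length ≤ i), bFinish]
  | succ n ih =>
    intro i hn rels
    by_cases hi : i < parts.length
    · have hdrop : parts.drop i = parts[i] :: parts.drop (i + 1) := List.drop_eq_getElem_cons hi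
      have hgetD : parts.getD i "" = parts[i] := by
        simp [List.getD_eq_getElem?_getD, List.getElem?_eq_getElem hi]
      rw [aLoop, if_pos hi, hgetD]
      by_cases hcol : PySem.Str.startswith parts[i] ":" = true
      · rw [if_pos hcol]
        by_cases hi1 : i + 1 < parts.length
        · have hdrop1 : parts.drop (i + 1) = parts[i + 1] :: parts.drop (i + 2) :=
            List.drop_eq_getElem_cons hi1
          have hgetD1 : parts.getD (i + 1) "" = parts[i + 1] := by
            simp [List.getD_eq_getElem?_getD, List.getElem?_eq_getElem hi1]
          rw [if_pos hi1, hgetD1]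
          by_cases hpar : PySem.Str.startswith parts[i + 1] "(" = true
          · rw [if_pos hpar]
            rw [hdrop, hdrop1]
            simp only [List.foldl_cons, bStep, hcol, hpar, if_true]
            have hge := aInner_ge parts parts.length 1 (i + 2)
            rw [aInner_main parts parts.length 1 (i + 2) (by omega) parts[i] [parts[i + 1]]
              rels (by omega)]
            have htake : parts[i + 1] ::
                (parts.drop (i + 2)).take (aInner parts parts.length 1 (i + 2) - (i + 2))
                = (parts.drop (i + 1)).take (aInner parts parts.length 1 (i + 2) - (i + 1)) := by
              rw [hdrop1, show aInner parts parts.length 1 (i + 2) - (i + 1)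
                  = (aInner parts parts.length 1 (i + 2) - (i + 2)) + 1 by omega,
                List.take_succ_cons]
            rw [ih (aInner parts parts.length 1 (i + 2)) (by omega)]
            simp [htake]
          · rw [if_neg hpar]
            rw [hdrop, hdrop1]
            simp only [List.foldl_cons, bStep, hcol, hpar, if_true, Bool.false_eq_true, if_false]
            exact ih (i + 2) (by omega) _
        · rw [if_neg hi1]
          have : parts.drop (i + 1) = [] := List.drop_eq_nil_of_le (by omega)
          rw [hdrop, this]
          simp only [List.foldl_cons, bStep, hcol, if_true]
          simp [bFinish]
      · rw [if_neg hcol, hdrop]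
        simp only [List.foldl_cons, bStep, hcol, Bool.false_eq_true, if_false]
        exact ih (i + 1) (by omega) _
    · rw [aLoop, if_neg (by omega)]
      simp [List.drop_eq_nil_of_le (by omega : parts.length ≤ i), bFinish]

theorem main_loop (parts : List String) (i : Nat) (rels : List (String × String)) :
    aLoop parts parts.length i rels = bFinish ((parts.drop i).foldl bStep (rels, .outside)) :=
  main_loop_aux parts parts.length i (by omega) rels

-- ===== VERDICT (by name: the statement is the Claim_ definition above) =====
theorem extract_concept_and_relations_py_spec : Claim_equal_extract_concept_and_relations_py := by
  intro s _ _
  unfold Spec_extract_concept_and_relations_py extract_concept_and_relations_py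
    extract_concept_and_relations_py_alt
  simp only [main_loop]
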